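-- pv_equiv track=rewrite | github.com/LorenzDettmann/SOM2CG | martini-som.py | determine_ring_beads
-- ===== SOURCE A (Python) =====
-- def determine_ring_beads(ring_atoms, beads):
--     # credit to cg_param
--     ring_beads = []
--     for ring in ring_atoms:
--         cgring = []
--         for atom in ring:
--             for i, bead in enumerate(beads):
--                 if (atom in bead) and (i not in cgring):
--                     cgring.append(i)
--         ring_beads.append(cgring)
--     return ring_beads
-- ===== SOURCE B (Python) =====
-- def _ring_cg(ring, beads):
--     # bead-major: each bead scanned once for its first matching ring atom,
--     # bucketed by that position; concatenating buckets reproduces the order.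
--     buckets = [[] for _ in ring]
--     for i, bead in enumerate(beads):
--         bs = set(bead)
--         q = next((p for p, a in enumerate(ring) if a in bs), None)
--         if q is not None:
--             buckets[q].append(i)
--     return [i for b in buckets for i in b]
--
--
-- def determine_ring_beads(ring_atoms, beads):
--     return [_ring_cg(ring, beads) for ring in ring_atoms]
-- ===== Notes on version B (the rewrite author's own statement) =====
-- stated objective: faster
-- what changed: Atom-major triple loop with a linear 'seen' membership test is replaced by a bead-major single scan: each bead finds the first ring position containing one of its atoms and is dropped into a per-position bucket; concatenating the buckets yields the same order without any dedup scan.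
import Mathlib
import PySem

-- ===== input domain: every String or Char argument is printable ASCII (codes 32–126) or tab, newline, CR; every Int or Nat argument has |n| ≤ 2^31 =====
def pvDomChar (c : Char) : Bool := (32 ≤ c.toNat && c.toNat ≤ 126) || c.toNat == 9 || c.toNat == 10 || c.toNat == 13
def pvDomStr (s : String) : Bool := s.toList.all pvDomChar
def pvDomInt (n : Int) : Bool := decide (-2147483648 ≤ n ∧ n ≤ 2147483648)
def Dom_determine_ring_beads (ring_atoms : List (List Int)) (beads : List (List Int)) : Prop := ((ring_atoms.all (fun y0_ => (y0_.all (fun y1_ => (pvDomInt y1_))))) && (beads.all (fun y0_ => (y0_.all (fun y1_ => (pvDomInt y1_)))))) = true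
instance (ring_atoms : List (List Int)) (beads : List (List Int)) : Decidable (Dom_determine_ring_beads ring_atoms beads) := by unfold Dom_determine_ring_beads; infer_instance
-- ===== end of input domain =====

-- B replaces A's atom-major triple loop (with its linear 'seen' scan) by a bead-major single
-- scan that buckets each bead at the position of its first matching ring atom; same return value.

-- ===== PORT A =====
def determine_ring_beads (ring_atoms : List (List Int)) (beads : List (List Int)) : List (List Int) :=
  ring_atoms.foldl (fun ring_beads ring =>
    ring_beads ++ [ring.foldl (fun cgring atom =>
      (PySem.List.enumerate beads).foldl (fun cgring ib =>
        if atom ∈ ib.2 ∧ ¬ (ib.1 ∈ cgring) then cgring ++ [ib.1] else cgring) cgring) []]) []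

-- ===== PORT B =====
-- bead-major helper: bucket each bead index at the first ring position whose atom it contains
def pvRingCg (ring : List Int) (beads : List (List Int)) : List Int :=
  ((PySem.List.enumerate beads).foldl (fun bk ib =>
    match ((PySem.List.enumerate ring).find? (fun qa => qa.2 ∈ PySem.Set.ofList ib.2)).map (·.1) with
    | some q => bk.modify q.toNat (· ++ [ib.1])
    | none => bk) (ring.map (fun _ => ([] : List Int)))).flatten

def determine_ring_beads_alt (ring_atoms : List (List Int)) (beads : List (List Int)) : List (List Int) :=
  ring_atoms.map (fun ring => pvRingCg ring beads)

-- ===== PRECONDITION & SPEC =====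
def Spec_determine_ring_beads (ring_atoms : List (List Int)) (beads : List (List Int)) (out : List (List Int)) : Prop := out = determine_ring_beads_alt ring_atoms beads
instance (ring_atoms : List (List Int)) (beads : List (List Int)) (out : List (List Int)) : Decidable (Spec_determine_ring_beads ring_atoms beads out) := by unfold Spec_determine_ring_beads; infer_instance

-- ===== CLAIM (what is proved, stated in full; the proofs are below) =====
def Claim_equal_determine_ring_beads : Prop := ∀ (ring_atoms : List (List Int)) (beads : List (List Int)), Dom_determine_ring_beads ring_atoms beads → Spec_determine_ring_beads ring_atoms beads (determine_ring_beads ring_atoms beads)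

-- ===== LEMMAS AND PROOFS =====

-- first ring position (as Python int) whose atom lies in `bead`
def pvFf (ring bead : List Int) : Option Int :=
  ((PySem.List.enumerate ring).find? (fun pa => pa.2 ∈ bead)).map (·.1)

-- bead indices (from enumeration `l`) whose first matching ring position is `p`
def pvGrp (ring : List Int) (l : List (Int × List Int)) (p : Nat) : List Int :=
  (l.filter (fun ib => pvFf ring ib.2 == some (p : Int))).map (·.1)

-- canonical value of one ring's output: bead indices grouped by first matching position
def pvCanon (ring : List Int) (beads : List (List Int)) : List Int :=
  (List.range ring.length).flatMap (fun p => pvGrp ring (PySem.List.enumerate beads) p)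

theorem pvFf_some_range {ring bead : List Int} {j : Int} (h : pvFf ring bead = some j) :
    0 ≤ j ∧ j.toNat < ring.length := by
  unfold pvFf at h
  cases hf : (PySem.List.enumerate ring).find? (fun pa => pa.2 ∈ bead) with
  | none => simp [hf] at h
  | some pa =>
    simp [hf] at h
    have hm := List.mem_of_find?_eq_some hf
    rw [PySem.List.mem_enumerate_iff] at hm
    obtain ⟨k, hk, hpa⟩ := hm
    subst hpa; simp at h; omega

theorem pvFf_append (rs : List Int) (a : Int) (bead : List Int) :
    pvFf (rs ++ [a]) bead = (pvFf rs bead).or (if a ∈ bead then some (rs.length : Int) else none) := by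
  unfold pvFf
  rw [PySem.List.enumerate_append, List.find?_append]
  cases hf : (PySem.List.enumerate rs 0).find? (fun pa => pa.2 ∈ bead) <;>
    simp [PySem.List.enumerate]

theorem pvInner_fold (atom : Int) (l : List (Int × List Int)) (acc : List Int)
    (hd : l.Pairwise (fun x y => x.1 ≠ y.1)) :
    l.foldl (fun cg ib => if atom ∈ ib.2 ∧ ¬ (ib.1 ∈ cg) then cg ++ [ib.1] else cg) acc
      = acc ++ (l.filter (fun ib => decide (atom ∈ ib.2) && decide (¬ (ib.1 ∈ acc)))).map (·.1) := by
  induction l generalizing acc with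
  | nil => simp
  | cons ib rest ih =>
    rw [List.pairwise_cons] at hd
    obtain ⟨hne, hrest⟩ := hd
    simp only [List.foldl_cons, List.filter_cons]
    by_cases hc : atom ∈ ib.2 ∧ ¬ (ib.1 ∈ acc)
    · rw [if_pos hc, ih _ hrest]
      have : rest.filter (fun x => decide (atom ∈ x.2) && decide (¬ (x.1 ∈ acc ++ [ib.1])))
           = rest.filter (fun x => decide (atom ∈ x.2) && decide (¬ (x.1 ∈ acc))) := by
        apply List.filter_congr
        intro x hx
        have h2 : x.1 ≠ ib.1 := Ne.symm (hne x hx)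
        simp [List.mem_append, h2]
      rw [this]
      simp [hc.1, hc.2]
    · rw [if_neg hc, ih _ hrest]
      have hb : (decide (atom ∈ ib.2) && decide (ib.1 ∉ acc)) = false := by
        rcases not_and_or.mp hc with h | h <;> simp [h]
      rw [hb]; simp

theorem pvEnum_fst_inj {beads : List (List Int)} {ib ib' : Int × List Int}
    (h : ib ∈ PySem.List.enumerate beads) (h' : ib' ∈ PySem.List.enumerate beads)
    (he : ib.1 = ib'.1) : ib = ib' := by
  rw [PySem.List.mem_enumerate_iff] at h h'
  obtain ⟨k, hk, rfl⟩ := h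
  obtain ⟨k', hk', rfl⟩ := h'
  simp only at he
  have : k = k' := by have h2 : (0:Int) + k = 0 + k' := he; omega
  subst this; rfl

theorem pvMem_canon {beads : List (List Int)} (rs : List Int) {ib : Int × List Int}
    (hib : ib ∈ PySem.List.enumerate beads) :
    ib.1 ∈ pvCanon rs beads ↔ (pvFf rs ib.2).isSome := by
  unfold pvCanon pvGrp
  simp only [List.mem_flatMap, List.mem_range, List.mem_map, List.mem_filter]
  constructor
  · rintro ⟨p, hp, ib', ⟨hib', hf⟩, he⟩
    have := pvEnum_fst_inj hib' hib he
    subst this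
    simp only [beq_iff_eq] at hf
    rw [hf]; rfl
  · intro hs
    cases hf : pvFf rs ib.2 with
    | none => rw [hf] at hs; simp at hs
    | some j =>
      obtain ⟨hj0, hjlt⟩ := pvFf_some_range hf
      exact ⟨j.toNat, hjlt, ib, ⟨hib, by simp [hf, Int.toNat_of_nonneg hj0]⟩, rfl⟩

theorem pvCanon_append (rs : List Int) (a : Int) (beads : List (List Int)) :
    pvCanon (rs ++ [a]) beads
      = pvCanon rs beads ++ pvGrp (rs ++ [a]) (PySem.List.enumerate beads) rs.length := by
  unfold pvCanon
  rw [List.length_append, List.length_singleton, List.range_succ, List.flatMap_append]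
  simp only [List.flatMap_singleton]
  congr 1
  apply List.flatMap_congr
  intro p hp
  rw [List.mem_range] at hp
  unfold pvGrp
  congr 1
  apply List.filter_congr
  intro ib _
  rw [pvFf_append]
  cases hf : pvFf rs ib.2 with
  | some j => simp
  | none =>
    simp only [Option.or]
    split
    · have : (rs.length : Int) ≠ (p : Int) := by exact_mod_cast Nat.ne_of_gt hp
      simp [this]
    · simp

theorem pvA_ring (beads : List (List Int)) (ring : List Int) :
    ring.foldl (fun cgring atom =>
      (PySem.List.enumerate beads).foldl (fun cgring ib =>
        if atom ∈ ib.2 ∧ ¬ (ib.1 ∈ cgring) then cgring ++ [ib.1] else cgring) cgring) []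
    = pvCanon ring beads := by
  induction ring using List.reverseRecOn with
  | nil => simp [pvCanon]
  | append_singleton rs a ih =>
    rw [List.foldl_append, List.foldl_cons, List.foldl_nil, ih]
    have hd : (PySem.List.enumerate beads).Pairwise (fun x y => x.1 ≠ y.1) :=
      (PySem.List.pairwise_lt_enumerate beads 0).imp (fun h => ne_of_lt h)
    rw [pvInner_fold a _ _ hd, pvCanon_append]
    congr 1
    unfold pvGrp
    congr 1
    apply List.filter_congr
    intro ib hib
    rw [pvFf_append]
    cases hf : pvFf rs ib.2 with
    | some j =>
      obtain ⟨hj0, hjlt⟩ := pvFf_some_range hf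
      have hne : j ≠ (rs.length : Int) := by omega
      have hm : ib.1 ∈ pvCanon rs beads := (pvMem_canon rs hib).mpr (by simp [hf])
      simp [Option.or, hne, hm]
    | none =>
      have hm : ¬ (ib.1 ∈ pvCanon rs beads) := fun h => by
        have := (pvMem_canon rs hib).mp h
        simp [hf] at this
      simp only [Option.or]
      by_cases h : a ∈ ib.2 <;> simp [h, hm]

theorem pvModify_map_range (n q : Nat) (g : Nat → List Int) (f : List Int → List Int) :
    ((List.range n).map g).modify q f = (List.range n).map (fun p => if p = q then f (g p) else g p) := by
  apply List.ext_getElem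
  · simp
  · intro i h1 h2
    simp only [List.getElem_modify, List.getElem_map, List.getElem_range] at *
    simp at h1
    by_cases hiq : q = i
    · simp [hiq]
    · rw [if_neg hiq, if_neg (fun h : i = q => hiq h.symm)]

theorem pvB_fold (ring : List Int) (l : List (Int × List Int)) (g : Nat → List Int) :
    l.foldl (fun bk ib =>
      match ((PySem.List.enumerate ring).find? (fun qa => qa.2 ∈ PySem.Set.ofList ib.2)).map (·.1) with
      | some q => bk.modify q.toNat (· ++ [ib.1])
      | none => bk) ((List.range ring.length).map g)
    = (List.range ring.length).map (fun p => g p ++ pvGrp ring l p) := by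
  induction l generalizing g with
  | nil => simp [pvGrp]
  | cons ib rest ih =>
    rw [List.foldl_cons]
    have hpred : (fun qa : Int × Int => decide (qa.2 ∈ PySem.Set.ofList ib.2)) = (fun qa => decide (qa.2 ∈ ib.2)) := by
      funext qa; simp [PySem.Set.mem_ofList]
    have hscr : ((PySem.List.enumerate ring).find? (fun qa => qa.2 ∈ PySem.Set.ofList ib.2)).map (·.1) = pvFf ring ib.2 := by
      unfold pvFf; rw [hpred]
    rw [hscr]
    cases hf : pvFf ring ib.2 with
    | none =>
      show (rest.foldl _ (List.map g (List.range ring.length)) = _)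
      rw [ih g]
      apply List.map_congr_left
      intro p _
      have : pvGrp ring (ib :: rest) p = pvGrp ring rest p := by
        unfold pvGrp
        rw [List.filter_cons]
        simp [hf]
      rw [this]
    | some j =>
      obtain ⟨hj0, hjlt⟩ := pvFf_some_range hf
      show (rest.foldl _ ((List.map g (List.range ring.length)).modify j.toNat (· ++ [ib.1])) = _)
      rw [pvModify_map_range ring.length j.toNat g _, ih]
      apply List.map_congr_left
      intro p hp
      have hgrp : pvGrp ring (ib :: rest) p
          = (if pvFf ring ib.2 == some (p : Int) then [ib.1] else []) ++ pvGrp ring rest p := by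
        unfold pvGrp
        rw [List.filter_cons]
        split <;> simp_all
      rw [hgrp, hf]
      by_cases hpj : p = j.toNat
      · subst hpj
        have : j = (j.toNat : Int) := (Int.toNat_of_nonneg hj0).symm
        simp [← this, List.append_assoc]
      · have : j ≠ (p : Int) := by omega
        simp [hpj, this]

theorem pvB_ring (beads : List (List Int)) (ring : List Int) :
    pvRingCg ring beads = pvCanon ring beads := by
  unfold pvRingCg
  have h0 : ring.map (fun _ => ([] : List Int)) = (List.range ring.length).map (fun _ => ([] : List Int)) := by
    simp
  rw [h0, pvB_fold]
  unfold pvCanon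
  rw [List.flatMap_def]
  simp


-- ===== VERDICT (by name: the statement is the Claim_ definition above) =====
theorem determine_ring_beads_spec : Claim_equal_determine_ring_beads := by
  intro ring_atoms beads _
  unfold Spec_determine_ring_beads determine_ring_beads determine_ring_beads_alt
  rw [PySem.List.foldl_append_singleton_eq_map]
  exact List.map_congr_left (fun ring _ => (pvA_ring beads ring).trans (pvB_ring beads ring).symm)
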